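-- pv_equiv track=rewrite | github.com/PirateMaryRead/DBLM-Btrfs-Layout-Manager | core/system.py | _parse_mount_options
-- ===== SOURCE A (Python) =====
-- def _parse_mount_options(options: str) -> tuple[str | None, str | None]:
--     subvol = None
--     subvolid = None
--     for item in options.split(","):
--         item = item.strip()
--         if item.startswith("subvol="):
--             subvol = item.split("=", 1)[1]
--         elif item.startswith("subvolid="):
--             subvolid = item.split("=", 1)[1]
--     return subvol, subvolid
-- ===== SOURCE B (Python) =====
-- def _parse_mount_options(options: str) -> tuple[str | None, str | None]:
--     opts = {}
--     for item in options.split(","):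
--         key, sep, value = item.strip().partition("=")
--         if sep:
--             opts[key] = value
--     return opts.get("subvol"), opts.get("subvolid")
-- ===== Notes on version B (the rewrite author's own statement) =====
-- stated objective: idiomatic
-- what changed: Instead of two per-item prefix tests updating two scalar variables, B parses every option into a key->value dict in one pass with partition('=') (storing only when a separator is present, so last duplicate wins) and then looks up 'subvol' and 'subvolid'.
import Mathlib
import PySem

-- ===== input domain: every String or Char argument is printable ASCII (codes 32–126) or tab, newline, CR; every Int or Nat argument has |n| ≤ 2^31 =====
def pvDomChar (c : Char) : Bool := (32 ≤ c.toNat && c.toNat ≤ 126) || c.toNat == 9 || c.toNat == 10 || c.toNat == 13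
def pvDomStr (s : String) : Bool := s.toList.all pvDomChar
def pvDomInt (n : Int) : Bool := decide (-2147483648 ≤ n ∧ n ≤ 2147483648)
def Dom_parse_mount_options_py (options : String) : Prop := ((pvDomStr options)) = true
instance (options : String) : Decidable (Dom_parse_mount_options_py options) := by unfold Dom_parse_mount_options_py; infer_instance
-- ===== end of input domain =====

-- B replaces A's two per-item prefix branches by a general parse-into-dict pass followed by two lookups (idiomatic; same cost).

-- ===== PORT A =====
-- the body of A's for-loop, acting on the state (subvol, subvolid)
def pvStepA (st : Option String × Option String) (item : String) : Option String × Option String :=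
  let item := PySem.Str.strip item
  if PySem.Str.startswith item "subvol=" then
    -- item.split("=", 1)[1]: "=" ≠ "" so split? is some; index 1 exists because item starts with "subvol=", so the getD defaults are never used
    (some ((PySem.List.pyGet? ((PySem.Str.splitMax? item "=" 1).getD []) 1).getD ""), st.2)
  else if PySem.Str.startswith item "subvolid=" then
    (st.1, some ((PySem.List.pyGet? ((PySem.Str.splitMax? item "=" 1).getD []) 1).getD ""))
  else st

def parse_mount_options_py (options : String) : Option String × Option String :=
  -- options.split(","): "," ≠ "" so split? is some
  ((PySem.Str.split? options ",").getD []).foldl pvStepA (none, none)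

-- ===== PORT B =====
-- exact port of s.partition("=") on the char list: (before, found?, after) at the FIRST '='
-- (Python returns the separator string itself; B only tests its truthiness, ported as the Bool)
def pvPartitionEq : List Char → List Char × Bool × List Char
  | [] => ([], false, [])
  | c :: rest =>
    if c = '=' then ([], true, rest)
    else
      let p := pvPartitionEq rest
      (c :: p.1, p.2.1, p.2.2)

-- item.strip().partition("=") as B's loop reads it
def pvPartition (s : String) : String × Bool × String :=
  let p := pvPartitionEq s.toList
  (String.ofList p.1, p.2.1, String.ofList p.2.2)

-- the body of B's for-loop, acting on the dict of options
def pvStepB (d : PySem.Dict String String) (item : String) : PySem.Dict String String :=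
  let p := pvPartition (PySem.Str.strip item)
  if p.2.1 then d.insert p.1 p.2.2 else d

def parse_mount_options_py_alt (options : String) : Option String × Option String :=
  let opts := ((PySem.Str.split? options ",").getD []).foldl pvStepB PySem.Dict.empty
  (opts.get? "subvol", opts.get? "subvolid")

-- ===== PRECONDITION & SPEC =====
def Spec_parse_mount_options_py (options : String) (out : Option String × Option String) : Prop := out = parse_mount_options_py_alt options
instance (options : String) (out : Option String × Option String) : Decidable (Spec_parse_mount_options_py options out) := by unfold Spec_parse_mount_options_py; infer_instance

-- ===== CLAIM (what is proved, stated in full; the proofs are below) =====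
def Claim_equal_parse_mount_options_py : Prop := ∀ (options : String), Dom_parse_mount_options_py options → Spec_parse_mount_options_py options (parse_mount_options_py options)

-- ===== LEMMAS AND PROOFS =====

-- a prefix "p=" (with '=' not in p) is detected exactly when partition finds a separator and the part before it is p
lemma isPrefixOf_iff_partition (p : List Char) (hp : '=' ∉ p) :
    ∀ t : List Char, (List.isPrefixOf (p ++ ['=']) t = true ↔
      (pvPartitionEq t).2.1 = true ∧ (pvPartitionEq t).1 = p) := by
  induction p with
  | nil =>
    intro t
    cases t with
    | nil => simp [pvPartitionEq]
    | cons c rest =>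
      by_cases h : c = '='
      · subst h; simp [pvPartitionEq, List.isPrefixOf]
      · simp [pvPartitionEq, List.isPrefixOf, h, Ne.symm h]
  | cons a p' ih =>
    intro t
    have ha : a ≠ '=' := by intro h; exact hp (h ▸ List.mem_cons_self)
    have hp' : '=' ∉ p' := fun h => hp (List.mem_cons_of_mem _ h)
    cases t with
    | nil => simp [pvPartitionEq]
    | cons c rest =>
      by_cases h : c = '='
      · subst h
        simp only [pvPartitionEq, List.cons_append, List.isPrefixOf]
        simp [ha]
      · have := ih hp' rest
        simp [pvPartitionEq, List.isPrefixOf, h, this]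
        by_cases hac : a = c
        · simp [hac]
        · simp [hac]
          intro _ hca _
          exact hac hca.symm

-- splitOnMax.go at maxsplit 0 dumps the rest
lemma splitOnMax_go_zero (sep : List Char) (fuel : Nat) (l cur : List Char) (acc : List (List Char)) :
    PySem.Chars.splitOnMax.go sep fuel 0 l cur acc = ((cur.reverse ++ l) :: acc).reverse := by
  cases fuel with
  | zero => rfl
  | succ n => cases l with
    | nil => simp [PySem.Chars.splitOnMax.go]
    | cons c rest => simp [PySem.Chars.splitOnMax.go]

-- splitOnMax.go with sep "=" and maxsplit 1 computes the partition at the first '='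
lemma splitOnMax_go_one :
    ∀ (fuel : Nat) (t cur : List Char) (acc : List (List Char)), t.length ≤ fuel →
    PySem.Chars.splitOnMax.go ['='] fuel 1 t cur acc =
      acc.reverse ++
        (if (pvPartitionEq t).2.1 then
          [cur.reverse ++ (pvPartitionEq t).1, (pvPartitionEq t).2.2]
         else [cur.reverse ++ (pvPartitionEq t).1]) := by
  intro fuel
  induction fuel with
  | zero =>
    intro t cur acc ht
    have : t = [] := List.length_eq_zero_iff.mp (Nat.le_zero.mp ht)
    subst this
    simp [PySem.Chars.splitOnMax.go, pvPartitionEq]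
  | succ n ih =>
    intro t cur acc ht
    cases t with
    | nil => simp [PySem.Chars.splitOnMax.go, pvPartitionEq]
    | cons c rest =>
      by_cases h : c = '='
      · subst h
        simp [PySem.Chars.splitOnMax.go, List.isPrefixOf, splitOnMax_go_zero, pvPartitionEq]
      · have hpre : List.isPrefixOf ['='] (c :: rest) = false := by
          simp [List.isPrefixOf, Ne.symm h]
        have := ih rest (c :: cur) acc (by simpa using Nat.le_of_succ_le_succ ht)
        simp only [PySem.Chars.splitOnMax.go, hpre, if_neg (one_ne_zero)]
        rw [this]
        simp [pvPartitionEq, h]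

-- item.split("=", 1) in terms of the partition
lemma splitOnMax_eq_partition (t : List Char) :
    PySem.Chars.splitOnMax t ['='] 1 =
      (if (pvPartitionEq t).2.1 then [(pvPartitionEq t).1, (pvPartitionEq t).2.2]
       else [(pvPartitionEq t).1]) := by
  have := splitOnMax_go_one (t.length + 1) t [] [] (Nat.le_succ _)
  simpa [PySem.Chars.splitOnMax] using this

-- one loop iteration of A equals one of B, read through the dict
lemma step_eq (d : PySem.Dict String String) (item : String) :
    pvStepA (d.get? "subvol", d.get? "subvolid") item =
      ((pvStepB d item).get? "subvol", (pvStepB d item).get? "subvolid") := by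
  simp only [pvStepA, pvStepB, pvPartition]
  generalize PySem.Str.strip item = t
  have hsub : PySem.Str.startswith t "subvol=" =
      ((pvPartitionEq t.toList).2.1 && ((pvPartitionEq t.toList).1 = "subvol".toList : Bool)) := by
    have h := isPrefixOf_iff_partition ("subvol".toList) (by decide) t.toList
    have h7 : ("subvol=".toList : List Char) = "subvol".toList ++ ['='] := by decide
    simp only [PySem.Str.startswith, PySem.Chars.startswith, h7]
    apply Bool.coe_iff_coe.mp
    simpa [Bool.and_eq_true, decide_eq_true_iff] using h
  have hsubid : PySem.Str.startswith t "subvolid=" =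
      ((pvPartitionEq t.toList).2.1 && ((pvPartitionEq t.toList).1 = "subvolid".toList : Bool)) := by
    have h := isPrefixOf_iff_partition ("subvolid".toList) (by decide) t.toList
    have h7 : ("subvolid=".toList : List Char) = "subvolid".toList ++ ['='] := by decide
    simp only [PySem.Str.startswith, PySem.Chars.startswith, h7]
    apply Bool.coe_iff_coe.mp
    simpa [Bool.and_eq_true, decide_eq_true_iff] using h
  have hsplit : (PySem.Str.splitMax? t "=" 1).getD [] =
      (if (pvPartitionEq t.toList).2.1 then
        [String.ofList (pvPartitionEq t.toList).1, String.ofList (pvPartitionEq t.toList).2.2]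
       else [String.ofList (pvPartitionEq t.toList).1]) := by
    simp only [PySem.Str.splitMax?, PySem.Chars.splitMax?,
      show ("=".toList : List Char) = ['='] from by decide, List.isEmpty_cons,
      Bool.false_eq_true, if_false]
    rw [splitOnMax_eq_partition]
    split <;> simp
  simp only [hsub, hsubid, hsplit]
  rcases hf : (pvPartitionEq t.toList).2.1 with _ | _
  · -- no '=': both branches of A are false, B leaves the dict alone
    simp
  · rcases hk1 : ((pvPartitionEq t.toList).1 = "subvol".toList : Bool) with _ | _
    · rcases hk2 : ((pvPartitionEq t.toList).1 = "subvolid".toList : Bool) with _ | _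
      · -- some other key: B inserts it, neither lookup changes
        have e1 : String.ofList (pvPartitionEq t.toList).1 ≠ "subvol" := by
          intro he
          have : (pvPartitionEq t.toList).1 = "subvol".toList := by
            rw [← he, String.toList_ofList]
          simp [this] at hk1
        have e2 : String.ofList (pvPartitionEq t.toList).1 ≠ "subvolid" := by
          intro he
          have : (pvPartitionEq t.toList).1 = "subvolid".toList := by
            rw [← he, String.toList_ofList]
          simp [this] at hk2
        simp [
          PySem.Dict.get?_insert_of_ne _ _ (Ne.symm e1), PySem.Dict.get?_insert_of_ne _ _ (Ne.symm e2)]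
      · -- "subvolid=...": A sets subvolid, B inserts under "subvolid"
        have hks : String.ofList (pvPartitionEq t.toList).1 = "subvolid" := by
          have := of_decide_eq_true hk2; rw [this]; exact String.ofList_toList
        simp [hks,
          PySem.List.pyGet?, PySem.List.pyIdx?, PySem.Dict.get?_insert_self,
          PySem.Dict.get?_insert_of_ne _ _ (show ("subvol" : String) ≠ "subvolid" by decide)]
    · -- "subvol=...": A sets subvol, B inserts under "subvol"
      have hks : String.ofList (pvPartitionEq t.toList).1 = "subvol" := by
        have := of_decide_eq_true hk1; rw [this]; exact String.ofList_toList
      simp [hks,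
        PySem.List.pyGet?, PySem.List.pyIdx?, PySem.Dict.get?_insert_self,
        PySem.Dict.get?_insert_of_ne _ _ (show ("subvolid" : String) ≠ "subvol" by decide)]

-- the whole loops agree, by induction over the items with the dict generalized
lemma loop_eq : ∀ (items : List String) (d : PySem.Dict String String),
    items.foldl pvStepA (d.get? "subvol", d.get? "subvolid") =
      ((items.foldl pvStepB d).get? "subvol", (items.foldl pvStepB d).get? "subvolid") := by
  intro items
  induction items with
  | nil => intro d; rfl
  | cons x xs ih =>
    intro d
    simp only [List.foldl_cons, step_eq d x]
    exact ih (pvStepB d x)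

-- ===== VERDICT (by name: the statement is the Claim_ definition above) =====
theorem parse_mount_options_py_spec : Claim_equal_parse_mount_options_py := by
  intro options _
  show parse_mount_options_py options = parse_mount_options_py_alt options
  unfold parse_mount_options_py parse_mount_options_py_alt
  have := loop_eq ((PySem.Str.split? options ",").getD []) PySem.Dict.empty
  simpa [PySem.Dict.get?_empty] using this
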